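-- pv_equiv track=rewrite | github.com/jdoeun/Algorithm-Study | iceprins/250122/PGS_괄호_회전하기.py | solution
-- ===== SOURCE A (Python) =====
-- from collections import deque
--
-- def check(s):
--     st = []
--     for char in s:
--         if char == "(" or char == "[" or char == "{":
--             st.append(char)
--         elif char == ")":
--             if not st:
--                 return False
--             if st[-1] != "(":
--                 return False
--             st.pop()
--         elif char == "]":
--             if not st:
--                 return False
--             if st[-1] != "[":
--                 return False
--             st.pop()
--         elif char == "}":
--             if not st:
--                 return False
--             if st[-1] != "{":
--                 return False
--             st.pop()
--
--     return len(st) == 0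
--
-- def solution(s):
--     answer = 0
--
--     q = deque(s)
--
--     for _ in range(len(q)):
--         q.rotate()
--         result = check(q)
--         if result:
--             answer += 1
--
--     return answer
-- ===== SOURCE B (Python) =====
-- def solution(s):
--     answer = 0
--     n = len(s)
--     for i in range(n):
--         t = ''.join(c for c in s[i:] + s[:i] if c in "()[]{}")
--         while True:
--             u = t.replace('()', '').replace('[]', '').replace('{}', '')
--             if u == t:
--                 break
--             t = u
--         if t == '':
--             answer += 1
--     return answer
-- ===== Notes on version B (the rewrite author's own statement) =====
-- stated objective: alternative
-- what changed: The stack-based bracket check is replaced by a reduction-to-fixpoint test (repeatedly delete adjacent matched bracket pairs via str.replace until the bracket string stabilises, accept iff it is empty), and rotations are built by string slicing instead of deque.rotate.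
import Mathlib
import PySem

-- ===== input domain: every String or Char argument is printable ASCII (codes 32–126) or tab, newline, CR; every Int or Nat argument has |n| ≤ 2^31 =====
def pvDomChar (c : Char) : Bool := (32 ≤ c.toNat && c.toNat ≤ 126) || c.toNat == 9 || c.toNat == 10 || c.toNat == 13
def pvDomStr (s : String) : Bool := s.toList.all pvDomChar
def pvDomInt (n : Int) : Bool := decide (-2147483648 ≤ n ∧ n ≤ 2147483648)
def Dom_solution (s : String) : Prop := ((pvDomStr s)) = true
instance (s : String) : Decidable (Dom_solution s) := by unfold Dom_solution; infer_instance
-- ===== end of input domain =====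

-- B replaces the stack-based check with a reduction-to-fixpoint balance test (repeated removal of
-- adjacent matched pairs on the bracket characters) and builds rotations by slicing; objective: alternative.

-- ===== PORT A =====

-- A's check: stack loop with early returns (stack top = list head)
def checkGo : List Char → List Char → Bool
  | st, [] => st == []
  | st, c :: t =>
    if c = '(' || c = '[' || c = '{' then checkGo (c :: st) t
    else if c = ')' then
      match st with
      | [] => false
      | x :: st' => if x != '(' then false else checkGo st' t
    else if c = ']' then
      match st with
      | [] => false
      | x :: st' => if x != '[' then false else checkGo st' t
    else if c = '}' then
      match st with
      | [] => false
      | x :: st' => if x != '{' then false else checkGo st' t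
    else checkGo st t

def check (s : List Char) : Bool := checkGo [] s

-- deque.rotate(1): move the last element to the front (no-op on the empty deque)
def rotR (q : List Char) : List Char :=
  match q.getLast? with
  | none => q
  | some c => c :: q.dropLast

def solution (s : String) : Int :=
  let q := s.toList
  ((List.range q.length).foldl
    (fun (st : List Char × Int) _ =>
      let q' := rotR st.1
      (q', if check q' then st.2 + 1 else st.2))
    (q, (0 : Int))).2

-- ===== PORT B =====

-- B-side helpers: the single replace pass `t.replace(xy, '')` as a structural recursion, with the
-- length facts the fixpoint loop's termination needs (the port cites them in decreasing_by).
def rmPair (a b : Char) : List Char → List Char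
  | [] => []
  | [c] => [c]
  | c :: d :: t => if c = a ∧ d = b then rmPair a b t else c :: rmPair a b (d :: t)

theorem replace_eq_rmPair (a b : Char) (l : List Char) :
    PySem.Chars.replace l [a, b] [] = rmPair a b l := by
  have go : ∀ (fuel : Nat) (m acc : List Char), m.length ≤ fuel →
      PySem.Chars.replace.go [a, b] [] fuel m acc = acc.reverse ++ rmPair a b m := by
    intro fuel
    induction fuel with
    | zero =>
      intro m acc h
      have : m = [] := by cases m <;> simp_all
      subst this; simp [PySem.Chars.replace.go, rmPair]
    | succ f ih =>
      intro m acc h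
      match m with
      | [] => simp [PySem.Chars.replace.go, rmPair]
      | [c] =>
        simp only [PySem.Chars.replace.go]
        by_cases hp : List.isPrefixOf [a,b] [c] = true
        · simp [List.isPrefixOf] at hp
        · simp only [hp, ih [] (c :: acc) (by simp)]
          simp [rmPair]
      | c :: d :: t =>
        simp only [PySem.Chars.replace.go]
        by_cases hp : List.isPrefixOf [a,b] (c::d::t) = true
        · have hc : c = a ∧ d = b := by
            simp [List.isPrefixOf] at hp; exact ⟨hp.1.symm, hp.2.symm⟩
          simp only [hp, if_true]
          simp only [List.length_cons, List.length_nil] at ⊢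
          rw [show ((0:Nat)+1+1) = 2 from rfl] at *
          rw [show List.drop 2 (c::d::t) = t from rfl]
          simp only [List.reverse_nil, List.nil_append]
          rw [ih t acc (by simp at h; omega)]
          simp [rmPair, hc.1, hc.2]
        · have hc : ¬ (c = a ∧ d = b) := by
            intro ⟨h1, h2⟩; subst h1; subst h2; simp [List.isPrefixOf] at hp
          simp only [hp, Bool.false_eq_true, if_false]
          rw [ih (d::t) (c::acc) (by simp at h ⊢; omega)]
          simp [rmPair, hc]
  simp only [PySem.Chars.replace]
  simpa using go l.length l [] le_rfl

theorem rmPair_length_le (a b : Char) (l : List Char) : (rmPair a b l).length ≤ l.length := by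
  fun_induction rmPair a b l with
  | case1 => simp
  | case2 => simp
  | case3 c d t h ih => simp only [rmPair, if_pos h, List.length_cons] at ih ⊢; omega
  | case4 c d t h ih => simp only [rmPair, if_neg h, List.length_cons] at ih ⊢; omega

theorem rmPair_eq_of_length (a b : Char) (l : List Char)
    (h : (rmPair a b l).length = l.length) : rmPair a b l = l := by
  fun_induction rmPair a b l with
  | case1 => rfl
  | case2 => rfl
  | case3 c d t hm ih =>
    exfalso
    have hle := rmPair_length_le a b t
    simp only [rmPair, if_pos hm, List.length_cons] at h hle
    omega
  | case4 c d t hm ih =>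
    simp only [rmPair, if_neg hm, List.length_cons] at h ih ⊢
    rw [ih (by omega)]

-- one pass of B's while body: the three replaces in order
def stepB (t : List Char) : List Char :=
  PySem.Chars.replace (PySem.Chars.replace (PySem.Chars.replace t ['(', ')'] []) ['[', ']'] []) ['{', '}'] []

theorem stepB_length_lt (t : List Char) (h : stepB t ≠ t) : (stepB t).length < t.length := by
  unfold stepB at *
  rw [replace_eq_rmPair, replace_eq_rmPair, replace_eq_rmPair] at *
  have h1 := rmPair_length_le '(' ')' t
  have h2 := rmPair_length_le '[' ']' (rmPair '(' ')' t)
  have h3 := rmPair_length_le '{' '}' (rmPair '[' ']' (rmPair '(' ')' t))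
  by_contra hlt
  rw [not_lt] at hlt
  have e3 : rmPair '{' '}' (rmPair '[' ']' (rmPair '(' ')' t)) = rmPair '[' ']' (rmPair '(' ')' t) :=
    rmPair_eq_of_length _ _ _ (by omega)
  have e2 : rmPair '[' ']' (rmPair '(' ')' t) = rmPair '(' ')' t :=
    rmPair_eq_of_length _ _ _ (by omega)
  have e1 : rmPair '(' ')' t = t :=
    rmPair_eq_of_length _ _ _ (by omega)
  rw [e3, e2, e1] at h
  exact h rfl

-- B's while loop: reduce to the fixpoint of stepB
def reduceFix (t : List Char) : List Char :=
  if h : stepB t = t then t else reduceFix (stepB t)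
termination_by t.length
decreasing_by exact stepB_length_lt t h

def isBr (c : Char) : Bool :=
  c == '(' || c == ')' || c == '[' || c == ']' || c == '{' || c == '}'

-- `c in "()[]{}"` for a single character is exactly membership in these six characters
def solution_alt (s : String) : Int :=
  let l := s.toList
  (List.range l.length).foldl
    (fun (answer : Int) (i : Nat) =>
      let t := (PySem.List.slice l (some (i : Int)) none ++
                PySem.List.slice l none (some (i : Int))).filter isBr
      if reduceFix t = [] then answer + 1 else answer)
    0

-- ===== PRECONDITION & SPEC =====
def Spec_solution (s : String) (out : Int) : Prop := out = solution_alt s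
instance (s : String) (out : Int) : Decidable (Spec_solution s out) := by unfold Spec_solution; infer_instance

-- ===== CLAIM (what is proved, stated in full; the proofs are below) =====
def Claim_equal_solution : Prop := ∀ (s : String), Dom_solution s → Spec_solution s (solution s)

-- ===== LEMMAS AND PROOFS =====

-- one transition of A's stack machine
def brStep (st : List Char) (c : Char) : Option (List Char) :=
  if c = '(' || c = '[' || c = '{' then some (c :: st)
  else if c = ')' then
    match st with
    | '(' :: st' => some st'
    | _ => none
  else if c = ']' then
    match st with
    | '[' :: st' => some st'
    | _ => none
  else if c = '}' then
    match st with
    | '{' :: st' => some st'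
    | _ => none
  else some st

theorem checkGo_cons (st : List Char) (c : Char) (t : List Char) :
    checkGo st (c :: t) =
      match brStep st c with
      | none => false
      | some st' => checkGo st' t := by
  cases st with
  | nil => simp only [checkGo, brStep]; split_ifs <;> rfl
  | cons x st' =>
    simp only [checkGo, brStep]
    split_ifs with h1 h2 h3 h4 <;>
      first
        | rfl
        | (by_cases hx : x = '(' <;> by_cases hy : x = '[' <;> by_cases hz : x = '{' <;>
            subst_vars <;> simp_all)

theorem brStep_of_not_isBr (st : List Char) (c : Char) (h : isBr c = false) :
    brStep st c = some st := by
  simp [isBr] at h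
  simp [brStep, h]

theorem checkGo_rmPair (a b : Char)
    (hab : (a = '(' ∧ b = ')') ∨ (a = '[' ∧ b = ']') ∨ (a = '{' ∧ b = '}'))
    (l : List Char) : ∀ st, checkGo st (rmPair a b l) = checkGo st l := by
  fun_induction rmPair a b l with
  | case1 => intro st; rfl
  | case2 => intro st; rfl
  | case3 c d t h ih =>
    intro st
    obtain ⟨rfl, rfl⟩ := h
    rcases hab with ⟨rfl, rfl⟩ | ⟨rfl, rfl⟩ | ⟨rfl, rfl⟩
    · rw [ih st]; rfl
    · rw [ih st]; rfl
    · rw [ih st]; rfl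
  | case4 c d t h ih =>
    intro st
    rw [checkGo_cons, checkGo_cons]
    cases brStep st c with
    | none => rfl
    | some st2 => exact ih st2

theorem checkGo_filter (l : List Char) : ∀ st, checkGo st (l.filter isBr) = checkGo st l := by
  induction l with
  | nil => intro st; rfl
  | cons c t ih =>
    intro st
    by_cases h : isBr c = true
    · rw [List.filter_cons_of_pos h, checkGo_cons, checkGo_cons]
      cases brStep st c with
      | none => rfl
      | some st2 => exact ih st2
    · have hb : isBr c = false := by simp_all
      rw [List.filter_cons_of_neg (by simp [hb]), checkGo_cons, brStep_of_not_isBr st c hb]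
      exact ih st

theorem rmPair_infix_length_lt (a b : Char) (l : List Char) (h : [a, b] <:+: l) :
    (rmPair a b l).length < l.length := by
  fun_induction rmPair a b l with
  | case1 => have := h.length_le; simp at this
  | case2 => have := h.length_le; simp at this
  | case3 c d t hm ih =>
    have := rmPair_length_le a b t
    simp only [List.length_cons]; omega
  | case4 c d t hm ih =>
    obtain ⟨u, v, huv⟩ := h
    cases u with
    | nil => simp at huv; exact absurd ⟨huv.1.symm, huv.2.1.symm⟩ hm
    | cons e u' =>
      simp only [List.cons_append, List.cons.injEq] at huv
      have hinf : [a, b] <:+: (d :: t) := ⟨u', v, huv.2⟩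
      have := ih hinf
      simp only [List.length_cons] at this ⊢
      omega

theorem rmPair_subset (a b : Char) (l : List Char) : rmPair a b l ⊆ l := by
  fun_induction rmPair a b l with
  | case1 => simp
  | case2 => simp
  | case3 x d t hm ih => exact ih.trans (by intro y hy; simp [hy])
  | case4 x d t hm ih =>
    intro y hy
    simp only [List.mem_cons] at hy ⊢
    rcases hy with rfl | hy
    · left; rfl
    · have := ih hy; simp at this; tauto

-- an irreducible bracket-only string accepted by the stack machine is empty
theorem irr_check (l : List Char) : ∀ (st : List Char),
    (∀ c ∈ l, isBr c = true) →
    rmPair '(' ')' (st.reverse ++ l) = st.reverse ++ l →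
    rmPair '[' ']' (st.reverse ++ l) = st.reverse ++ l →
    rmPair '{' '}' (st.reverse ++ l) = st.reverse ++ l →
    checkGo st l = true → l = [] ∧ st = [] := by
  induction l with
  | nil =>
    intro st _ _ _ _ hchk
    simp [checkGo] at hchk
    exact ⟨rfl, hchk⟩
  | cons c t ih =>
    intro st hbr h1 h2 h3 hchk
    rw [checkGo_cons] at hchk
    have hc : isBr c = true := hbr c (by simp)
    have hshift : ∀ x : Char, st.reverse ++ x :: t = (x :: st).reverse ++ t := by
      intro x; simp
    simp only [isBr, Bool.or_eq_true, beq_iff_eq] at hc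
    rcases hc with ((((rfl | rfl) | rfl) | rfl) | rfl) | rfl
    · -- c = '('
      rw [show brStep st '(' = some ('(' :: st) from rfl] at hchk
      exfalso
      have := ih ('(' :: st) (fun x hx => hbr x (by simp [hx]))
        (by rw [← hshift]; exact h1) (by rw [← hshift]; exact h2)
        (by rw [← hshift]; exact h3) hchk
      exact absurd this.2 (by simp)
    · -- c = ')'
      exfalso
      match st with
      | [] => simp [brStep] at hchk
      | x :: st' =>
        by_cases hx : x = '('
        · subst hx
          have hinf : ['(', ')'] <:+: ((('(' :: st').reverse) ++ ')' :: t) :=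
            ⟨st'.reverse, t, by simp⟩
          have := rmPair_infix_length_lt '(' ')' _ hinf
          rw [h1] at this
          exact absurd this (lt_irrefl _)
        · simp [brStep, hx] at hchk
    · -- c = '['
      rw [show brStep st '[' = some ('[' :: st) from rfl] at hchk
      exfalso
      have := ih ('[' :: st) (fun x hx => hbr x (by simp [hx]))
        (by rw [← hshift]; exact h1) (by rw [← hshift]; exact h2)
        (by rw [← hshift]; exact h3) hchk
      exact absurd this.2 (by simp)
    · -- c = ']'
      exfalso
      match st with
      | [] => simp [brStep] at hchk
      | x :: st' =>
        by_cases hx : x = '['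
        · subst hx
          have hinf : ['[', ']'] <:+: ((('[' :: st').reverse) ++ ']' :: t) :=
            ⟨st'.reverse, t, by simp⟩
          have := rmPair_infix_length_lt '[' ']' _ hinf
          rw [h2] at this
          exact absurd this (lt_irrefl _)
        · simp [brStep, hx] at hchk
    · -- c = '{'
      rw [show brStep st '{' = some ('{' :: st) from rfl] at hchk
      exfalso
      have := ih ('{' :: st) (fun x hx => hbr x (by simp [hx]))
        (by rw [← hshift]; exact h1) (by rw [← hshift]; exact h2)
        (by rw [← hshift]; exact h3) hchk
      exact absurd this.2 (by simp)
    · -- c = '}'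
      exfalso
      match st with
      | [] => simp [brStep] at hchk
      | x :: st' =>
        by_cases hx : x = '{'
        · subst hx
          have hinf : ['{', '}'] <:+: ((('{' :: st').reverse) ++ '}' :: t) :=
            ⟨st'.reverse, t, by simp⟩
          have := rmPair_infix_length_lt '{' '}' _ hinf
          rw [h3] at this
          exact absurd this (lt_irrefl _)
        · simp [brStep, hx] at hchk

theorem checkGo_stepB (t : List Char) : ∀ st, checkGo st (stepB t) = checkGo st t := by
  intro st
  unfold stepB
  rw [replace_eq_rmPair, replace_eq_rmPair, replace_eq_rmPair,
    checkGo_rmPair '{' '}' (by tauto) _ st, checkGo_rmPair '[' ']' (by tauto) _ st,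
    checkGo_rmPair '(' ')' (by tauto) _ st]

theorem checkGo_reduceFix (t : List Char) : checkGo [] (reduceFix t) = checkGo [] t := by
  fun_induction reduceFix t with
  | case1 t h => rfl
  | case2 t h ih => rw [ih]; exact checkGo_stepB t []

theorem stepB_reduceFix (t : List Char) : stepB (reduceFix t) = reduceFix t := by
  fun_induction reduceFix t with
  | case1 t h => exact h
  | case2 t h ih => exact ih

theorem stepB_subset (t : List Char) : stepB t ⊆ t := by
  unfold stepB
  rw [replace_eq_rmPair, replace_eq_rmPair, replace_eq_rmPair]
  exact (rmPair_subset _ _ _).trans ((rmPair_subset _ _ _).trans (rmPair_subset _ _ _))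

theorem reduceFix_subset (t : List Char) : reduceFix t ⊆ t := by
  fun_induction reduceFix t with
  | case1 t h => exact fun x hx => hx
  | case2 t h ih => exact ih.trans (stepB_subset t)

-- at a fixpoint of stepB each single replace pass is already the identity
theorem stepB_fix (r : List Char) (h : stepB r = r) :
    rmPair '(' ')' r = r ∧ rmPair '[' ']' r = r ∧ rmPair '{' '}' r = r := by
  unfold stepB at h
  rw [replace_eq_rmPair, replace_eq_rmPair, replace_eq_rmPair] at h
  have hlen := congrArg List.length h
  have h1 := rmPair_length_le '(' ')' r
  have h2 := rmPair_length_le '[' ']' (rmPair '(' ')' r)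
  have h3 := rmPair_length_le '{' '}' (rmPair '[' ']' (rmPair '(' ')' r))
  have e1 : rmPair '(' ')' r = r :=
    rmPair_eq_of_length _ _ _ (by omega)
  rw [e1] at h
  have h2' := rmPair_length_le '[' ']' r
  have h3' := rmPair_length_le '{' '}' (rmPair '[' ']' r)
  have hlen' := congrArg List.length h
  have e2 : rmPair '[' ']' r = r :=
    rmPair_eq_of_length _ _ _ (by omega)
  rw [e2] at h
  exact ⟨e1, e2, h⟩

-- per-string equivalence: A's check agrees with B's filter-and-reduce test
theorem check_eq_reduce (l : List Char) :
    check l = decide (reduceFix (l.filter isBr) = []) := by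
  unfold check
  rw [← checkGo_filter l []]
  by_cases hr : reduceFix (l.filter isBr) = []
  · rw [← checkGo_reduceFix, hr]
    simp [checkGo]
  · simp only [hr, decide_false]
    by_contra hchk
    simp only [Bool.not_eq_false] at hchk
    rw [← checkGo_reduceFix] at hchk
    have hfix := stepB_fix _ (stepB_reduceFix (l.filter isBr))
    have hbr : ∀ c ∈ reduceFix (l.filter isBr), isBr c = true := by
      intro c hc
      exact List.of_mem_filter (reduceFix_subset _ hc)
    have := irr_check (reduceFix (l.filter isBr)) []
      hbr (by simpa using hfix.1) (by simpa using hfix.2.1) (by simpa using hfix.2.2) hchk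
    exact hr this.1

theorem rotR_append (u v : List Char) (hv : v ≠ []) :
    rotR (u ++ v) = v.getLast hv :: (u ++ v.dropLast) := by
  unfold rotR
  rw [List.getLast?_append_of_ne_nil _ hv, List.getLast?_eq_some_getLast hv]
  simp [List.dropLast_append_of_ne_nil hv]

theorem rotR_iterate (q : List Char) : ∀ (k : Nat), k < q.length →
    rotR^[k+1] q = q.drop (q.length - (k+1)) ++ q.take (q.length - (k+1)) := by
  intro k
  induction k with
  | zero =>
    intro hk
    have hq : q ≠ [] := by intro h; simp [h] at hk
    have h0 := rotR_append [] q hq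
    simp only [List.nil_append] at h0
    rw [Function.iterate_one, h0, List.dropLast_eq_take]
    have hdrop : q.drop (q.length - 1) = [q.getLast hq] := by
      rw [List.drop_length_sub_one hq]
    rw [hdrop]
    rfl
  | succ k ih =>
    intro hk
    have hk' : k < q.length := by omega
    rw [Function.iterate_succ_apply', ih hk']
    obtain ⟨i, hi⟩ : ∃ i, q.length - (k+1) = i := ⟨_, rfl⟩
    rw [hi]
    have hi1 : 1 ≤ i := by omega
    have hin : i ≤ q.length := by omega
    have hilt : i - 1 < q.length := by omega
    have htne : q.take i ≠ [] := by
      intro h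
      have := congrArg List.length h
      simp [List.length_take] at this
      rcases this with h0 | rfl
      · omega
      · simp at hk
    rw [rotR_append _ _ htne]
    have hlast : (q.take i).getLast htne = q[i-1]'hilt := by
      rw [List.getLast_eq_getElem]
      simp only [List.length_take]
      rw [List.getElem_take]
      congr 1
      omega
    have hmin : min i q.length = i := by omega
    have hmin2 : min (i-1) i = i - 1 := by omega
    have hdl : (q.take i).dropLast = q.take (i-1) := by
      rw [List.dropLast_eq_take, List.length_take, List.take_take, hmin, hmin2]
    rw [hlast, hdl]
    have hone : i - 1 + 1 = i := by omega
    have hdrop : q.drop (i-1) = q[i-1]'hilt :: q.drop i := by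
      rw [List.drop_eq_getElem_cons hilt, hone]
    have heq : q.length - (k+1+1) = i - 1 := by omega
    rw [heq, hdrop]
    rfl

-- A's loop: after j iterations the deque is the j-fold right rotation and the counter
-- counts the accepted rotations so far
theorem A_loop (q : List Char) (acc : Int) : ∀ (j : Nat),
    (List.range j).foldl
      (fun (st : List Char × Int) _ =>
        let q' := rotR st.1
        (q', if check q' then st.2 + 1 else st.2)) (q, acc)
    = (rotR^[j] q, acc + (((List.range j).countP (fun k => check (rotR^[k+1] q))) : Int)) := by
  intro j
  induction j with
  | zero => simp
  | succ j ih =>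
    rw [List.range_succ, List.foldl_append, ih]
    simp only [List.foldl_cons, List.foldl_nil, List.countP_append, List.countP_cons,
      List.countP_nil, Function.iterate_succ_apply']
    by_cases hc : check (rotR (rotR^[j] q)) = true <;>
      simp [hc, Function.iterate_succ_apply'] <;> push_cast <;> ring

-- reindexing: counting over k ↦ n-1-k is counting over the reversed range
theorem countP_range_comm (n : Nat) (P : Nat → Bool) :
    (List.range n).countP (fun k => P (n-1-k)) = (List.range n).countP P := by
  have hmap : (List.range n).map (fun k => n-1-k) = (List.range n).reverse := by
    apply List.ext_getElem
    · simp
    · intro i h1 h2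
      simp [List.getElem_map, List.getElem_range, List.getElem_reverse]
  calc (List.range n).countP (fun k => P (n-1-k))
      = ((List.range n).map (fun k => n-1-k)).countP P := by rw [List.countP_map]; rfl
    _ = (List.range n).reverse.countP P := by rw [hmap]
    _ = (List.range n).countP P := by rw [List.countP_reverse]

-- ===== VERDICT (by name: the statement is the Claim_ definition above) =====
theorem solution_spec : Claim_equal_solution := by
  unfold Claim_equal_solution Spec_solution
  intro s _
  have hA : solution s = ((List.range s.toList.length).foldl
      (fun (st : List Char × Int) _ =>
        let q' := rotR st.1
        (q', if check q' then st.2 + 1 else st.2)) (s.toList, (0 : Int))).2 := rfl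
  have hB : solution_alt s = (List.range s.toList.length).foldl
      (fun (answer : Int) (i : Nat) =>
        if reduceFix ((PySem.List.slice s.toList (some (i : Int)) none ++
            PySem.List.slice s.toList none (some (i : Int))).filter isBr) = []
        then answer + 1 else answer) 0 := rfl
  rw [hA, hB, A_loop, PySem.List.foldl_ite_add_one]
  simp only [zero_add]
  congr 1
  refine Eq.trans (List.countP_congr ?_) (countP_range_comm s.toList.length _)
  intro k hk
  rw [List.mem_range] at hk
  rw [rotR_iterate s.toList k hk, check_eq_reduce]
  have hX : s.toList.length - (k+1) = s.toList.length - 1 - k := by omega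
  rw [hX]
  simp only [PySem.List.slice_from_natCast, PySem.List.slice_to_natCast]
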